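-- pv_equiv track=rewrite | github.com/oran123412/git-with-github | python/via_teachers/Meni/meni22.10.py | min_max_digits
-- ===== SOURCE A (Python) =====
-- def min_max_digits(num):
--     max_num=min_num=num%10
--     while num>0:
--         current_number=num%10
--         if current_number>max_num:
--             max_num=current_number
--         if current_number<min_num:
--             min_num=current_number
--         num=num//10
--     return (f"The max number is {max_num} ,the lowest number is {min_num}")
-- ===== SOURCE B (Python) =====
-- def min_max_digits(num):
--     digits = [num % 10]
--     n = num
--     while n > 0:
--         digits.append(n % 10)
--         n //= 10
--     return (f"The max number is {max(digits)} ,the lowest number is {min(digits)}")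
-- ===== Notes on version B (the rewrite author's own statement) =====
-- stated objective: simpler
-- what changed: B collects the digits into a list (seeded with num%10 like A's initialization) and computes the result with the builtin reductions max/min instead of A's per-iteration comparison branches.
import Mathlib
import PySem

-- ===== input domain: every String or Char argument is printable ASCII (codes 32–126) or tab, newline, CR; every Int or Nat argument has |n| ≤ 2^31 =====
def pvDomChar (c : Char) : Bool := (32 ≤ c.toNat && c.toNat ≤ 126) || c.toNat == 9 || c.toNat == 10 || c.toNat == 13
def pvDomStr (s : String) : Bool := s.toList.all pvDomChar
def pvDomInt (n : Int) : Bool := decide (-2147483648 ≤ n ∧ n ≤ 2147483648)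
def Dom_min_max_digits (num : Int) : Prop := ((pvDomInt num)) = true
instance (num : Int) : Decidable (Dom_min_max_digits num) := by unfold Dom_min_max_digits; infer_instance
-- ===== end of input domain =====

-- ===== PORT A =====
-- B collects digits into a list and uses max/min reductions; A keeps running max/min. Equal return value proved.
def minMaxLoop (num maxn minn : Int) : Int × Int :=
  if 0 < num then
    let c := PySem.Int.mod num 10
    minMaxLoop (PySem.Int.floordiv num 10)
      (if maxn < c then c else maxn) (if c < minn then c else minn)
  else (maxn, minn)
termination_by num.toNat
decreasing_by rw [PySem.Int.floordiv_eq_ediv_of_pos (by omega : (0:Int) < 10)]; omega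

def min_max_digits (num : Int) : String :=
  let m0 := PySem.Int.mod num 10
  let r := minMaxLoop num m0 m0
  "The max number is " ++ PySem.Int.toStr r.1 ++ " ,the lowest number is " ++ PySem.Int.toStr r.2

-- ===== PORT B =====
def digitsLoop (num : Int) : List Int :=
  if 0 < num then PySem.Int.mod num 10 :: digitsLoop (PySem.Int.floordiv num 10) else []
termination_by num.toNat
decreasing_by rw [PySem.Int.floordiv_eq_ediv_of_pos (by omega : (0:Int) < 10)]; omega

def min_max_digits_alt (num : Int) : String :=
  let digits := PySem.Int.mod num 10 :: digitsLoop num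
  let mx := (PySem.List.max? digits (fun x => x)).getD 0
  let mn := (PySem.List.min? digits (fun x => x)).getD 0
  "The max number is " ++ PySem.Int.toStr mx ++ " ,the lowest number is " ++ PySem.Int.toStr mn

-- ===== PRECONDITION & SPEC =====
def Spec_min_max_digits (num : Int) (out : String) : Prop := out = min_max_digits_alt num
instance (num : Int) (out : String) : Decidable (Spec_min_max_digits num out) := by unfold Spec_min_max_digits; infer_instance

-- ===== CLAIM =====
def Claim_equal_min_max_digits : Prop := ∀ (num : Int), Dom_min_max_digits num → Spec_min_max_digits num (min_max_digits num)

-- ===== LEMMAS AND PROOFS =====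
theorem minMaxLoop_eq_folds (num : Int) : ∀ (mx mn : Int),
    minMaxLoop num mx mn = ((digitsLoop num).foldl max mx, (digitsLoop num).foldl min mn) := by
  induction num using digitsLoop.induct with
  | case1 num h ih =>
      intro mx mn
      rw [minMaxLoop, digitsLoop, if_pos h, if_pos h]
      simp only [List.foldl_cons]
      rw [ih]
      congr 2 <;> simp [max_def, min_def] <;> omega
  | case2 num h =>
      intro mx mn
      rw [minMaxLoop, digitsLoop, if_neg h, if_neg h]
      rfl

-- ===== VERDICT =====
theorem min_max_digits_spec : Claim_equal_min_max_digits := by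
  intro num _
  show min_max_digits num = min_max_digits_alt num
  unfold min_max_digits min_max_digits_alt
  simp only [minMaxLoop_eq_folds, PySem.List.max?_id_cons, PySem.List.min?_id_cons,
    Option.getD_some]
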